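-- pv_equiv track=rewrite | github.com/sheikhxzaheer/ai_video_tool | processing/segment_builder.py | _build_char_to_word_map
-- ===== SOURCE A (Python) =====
-- from typing import Any, Dict, List, Optional, Tuple
--
-- def _build_char_to_word_map(word_timestamps: List[Dict[str, Any]]) -> Tuple[str, List[Tuple[int, int]]]:
--     words = [w["word"] for w in word_timestamps]
--     char_ranges: List[Tuple[int, int]] = []
--     pos = 0
--     for w in words:
--         start = pos
--         pos += len(w)
--         char_ranges.append((start, pos))
--         pos += 1
--     return " ".join(words), char_ranges
-- ===== SOURCE B (Python) =====
-- from typing import Any, Dict, List, Tuple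
--
-- def _build_char_to_word_map(word_timestamps: List[Dict[str, Any]]) -> Tuple[str, List[Tuple[int, int]]]:
--     words = [w["word"] for w in word_timestamps]
--
--     def ranges(ws: List[str]) -> List[Tuple[int, int]]:
--         # structural recursion: the head occupies (0, len); the tail's ranges,
--         # computed independently, are shifted past the head and its separator
--         if not ws:
--             return []
--         head = len(ws[0])
--         return [(0, head)] + [(s + head + 1, e + head + 1) for s, e in ranges(ws[1:])]
--
--     return " ".join(words), ranges(words)
-- ===== Notes on version B (the rewrite author's own statement) =====
-- stated objective: alternative
-- what changed: B replaces A's single pass threading a mutable position accumulator by structural recursion: each suffix's ranges are computed independently starting at 0 and the recursive result is shifted past the head word and its separator.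
import Mathlib
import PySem

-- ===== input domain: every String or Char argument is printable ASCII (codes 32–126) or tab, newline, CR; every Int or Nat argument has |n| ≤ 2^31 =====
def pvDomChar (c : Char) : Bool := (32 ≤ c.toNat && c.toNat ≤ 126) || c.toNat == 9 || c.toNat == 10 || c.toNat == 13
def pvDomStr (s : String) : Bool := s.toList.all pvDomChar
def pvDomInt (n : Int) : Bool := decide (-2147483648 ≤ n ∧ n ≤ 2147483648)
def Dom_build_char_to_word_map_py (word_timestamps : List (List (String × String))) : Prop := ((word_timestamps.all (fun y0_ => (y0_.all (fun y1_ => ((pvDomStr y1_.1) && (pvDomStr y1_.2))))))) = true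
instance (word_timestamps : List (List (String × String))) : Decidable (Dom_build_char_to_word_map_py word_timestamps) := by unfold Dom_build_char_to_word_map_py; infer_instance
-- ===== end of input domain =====

-- B replaces A's mutable-position loop by structural recursion that shifts the tail's independently computed ranges (objective: alternative decomposition).

-- ===== PORT A =====
-- w["word"]: first-match association-list lookup (exact under Pre_: the key is present)
def pvGetWord (d : List (String × String)) : String :=
  ((d.find? (fun p => p.1 == "word")).map (·.2)).getD ""

def build_char_to_word_map_py (word_timestamps : List (List (String × String))) : String × (List (Int × Int)) :=
  let words := word_timestamps.map pvGetWord
  let res := words.foldl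
    (fun (st : Int × List (Int × Int)) w =>
      (st.1 + PySem.Str.len w + 1, st.2 ++ [(st.1, st.1 + PySem.Str.len w)]))
    (0, [])
  (PySem.Str.join " " words, res.2)

-- ===== PORT B =====
-- def ranges(ws): [] if empty, else (0, len(head)) followed by the tail's ranges shifted by len(head)+1
def pvRanges : List String → List (Int × Int)
  | [] => []
  | w :: ws =>
      (0, PySem.Str.len w) ::
        (pvRanges ws).map (fun p => (p.1 + PySem.Str.len w + 1, p.2 + PySem.Str.len w + 1))

def build_char_to_word_map_py_alt (word_timestamps : List (List (String × String))) : String × (List (Int × Int)) :=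
  let words := word_timestamps.map pvGetWord
  (PySem.Str.join " " words, pvRanges words)

-- ===== PRECONDITION & SPEC =====
-- Pre_ excludes exactly the inputs where some entry lacks the key "word": there Python A (and B alike) raises KeyError.
def Pre_build_char_to_word_map_py (word_timestamps : List (List (String × String))) : Prop :=
  (word_timestamps.all (fun d => d.any (fun p => p.1 == "word"))) = true
instance (word_timestamps : List (List (String × String))) : Decidable (Pre_build_char_to_word_map_py word_timestamps) := by unfold Pre_build_char_to_word_map_py; infer_instance

def pvWitness_build_char_to_word_map_py : (List (List (String × String))) :=
  [[("word", "hi")], [("word", "there"), ("start", "1")]]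

def Spec_build_char_to_word_map_py (word_timestamps : List (List (String × String))) (out : String × (List (Int × Int))) : Prop := out = build_char_to_word_map_py_alt word_timestamps
instance (word_timestamps : List (List (String × String))) (out : String × (List (Int × Int))) : Decidable (Spec_build_char_to_word_map_py word_timestamps out) := by unfold Spec_build_char_to_word_map_py; infer_instance

-- ===== CLAIM (what is proved, stated in full; the proofs are below) =====
def Claim_equal_build_char_to_word_map_py : Prop := ∀ (word_timestamps : List (List (String × String))), Dom_build_char_to_word_map_py word_timestamps → Pre_build_char_to_word_map_py word_timestamps → Spec_build_char_to_word_map_py word_timestamps (build_char_to_word_map_py word_timestamps)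

-- ===== LEMMAS AND PROOFS =====

-- A's loop from position p appends exactly B's ranges shifted by p.
lemma pv_loop_eq (ws : List String) (p : Int) (acc : List (Int × Int)) :
    (ws.foldl
      (fun (st : Int × List (Int × Int)) w =>
        (st.1 + PySem.Str.len w + 1, st.2 ++ [(st.1, st.1 + PySem.Str.len w)]))
      (p, acc)).2
    = acc ++ (pvRanges ws).map (fun q => (q.1 + p, q.2 + p)) := by
  induction ws generalizing p acc with
  | nil => simp [pvRanges]
  | cons w ws ih =>
    simp only [List.foldl_cons, pvRanges]
    rw [ih, List.append_assoc, List.singleton_append]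
    refine congrArg _ ?_
    simp only [List.map_cons, List.map_map]
    congr 1
    · simp only [Prod.mk.injEq]
      omega
    refine List.map_congr_left (fun q _ => ?_)
    simp only [Function.comp, Prod.mk.injEq]
    omega

-- ===== VERDICT (by name: the statement is the Claim_ definition above) =====
theorem build_char_to_word_map_py_spec : Claim_equal_build_char_to_word_map_py := by
  intro wts _ _
  show _ = _
  unfold build_char_to_word_map_py build_char_to_word_map_py_alt
  simp only [pv_loop_eq, List.nil_append]
  refine congrArg _ ?_
  refine (List.map_congr_left (fun q _ => ?_)).trans (List.map_id _)
  simp
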